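-- pv_equiv track=rewrite | github.com/xiaotai-yang/tai_surf | ED/twoD_tool.py | ABC
-- ===== SOURCE A (Python) =====
-- def ABC(L):
--     B = {}
--     A = {0}
--     C = {}
--     for i in range (1, L):
--         B[i] = [i+j*(L-1) for j in range(i+1)]
--     for i in range (L, 2*L-2):
--         B[i] = [(i-L+1)*L+j*(L-1) for j in range(1, 2*L-i)]
--     for i in B:
--         if i!=1:
--             B[i]+=B[i-1]
--             B[i].sort()
--     for i in B:
--         C[i] = set(range(L**2))-set(B[i])-A
--     return A, B, C
-- ===== SOURCE B (Python) =====
-- def ABC(L):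
--     A = {0}
--     B = {}
--     C = {}
--     for i in range(1, 2 * L - 2):
--         bi = []
--         ci = set()
--         for r in range(L):
--             bi.extend(range(r * L + max(0, 1 - r), r * L + min(i - r, L - 1) + 1))
--             ci.update(range(r * L + max(0, i + 1 - r), r * L + L))
--         B[i] = bi
--         C[i] = ci
--     return A, B, C
-- ===== Notes on version B (the rewrite author's own statement) =====
-- stated objective: alternative
-- what changed: Replaces A's two per-region diagonal index formulas, cumulative list concatenation with repeated in-place sorts, and full set-difference construction of C by a direct per-row characterisation: for each key i, row r of the L x L grid contributes the contiguous index range of columns c with 1 <= r+c <= i to B[i] (already in sorted order, so no sort is needed) and the range with r+c > i to C[i] (so no set differences are needed).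
import Mathlib
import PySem

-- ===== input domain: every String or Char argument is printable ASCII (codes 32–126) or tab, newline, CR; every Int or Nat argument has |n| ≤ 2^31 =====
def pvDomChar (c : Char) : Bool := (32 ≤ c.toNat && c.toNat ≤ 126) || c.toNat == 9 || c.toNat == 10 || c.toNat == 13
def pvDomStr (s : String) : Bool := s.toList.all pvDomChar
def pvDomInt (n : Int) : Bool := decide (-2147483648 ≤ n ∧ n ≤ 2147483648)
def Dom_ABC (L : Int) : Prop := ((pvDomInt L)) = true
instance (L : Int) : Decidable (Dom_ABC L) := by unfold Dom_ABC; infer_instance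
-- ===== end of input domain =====

-- B replaces A's per-region index formulas, cumulative concatenation with repeated sorts, and
-- set differences by emitting, per key i, one already-sorted index range per grid row
-- (row r contributes columns with 1 <= r+c <= i to B[i], the rest to C[i]); objective: alternative.

-- ===== PORT A =====
def ABC (L : Int) : List Int × (List (Int × List Int)) × (List (Int × List Int)) :=
  -- B = {} ; A = {0} ; C = {}
  let A : PySem.Set Int := PySem.Set.ofList [0]
  -- for i in range(1, L): B[i] = [i+j*(L-1) for j in range(i+1)]
  let B1 : PySem.Dict Int (List Int) :=
    (PySem.List.pyRange 1 L).foldl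
      (fun d i => d.insert i ((PySem.List.pyRange 0 (i+1)).map (fun j => i + j*(L-1))))
      PySem.Dict.empty
  -- for i in range(L, 2*L-2): B[i] = [(i-L+1)*L+j*(L-1) for j in range(1, 2*L-i)]
  let B2 : PySem.Dict Int (List Int) :=
    (PySem.List.pyRange L (2*L-2)).foldl
      (fun d i => d.insert i ((PySem.List.pyRange 1 (2*L-i)).map (fun j => (i-L+1)*L + j*(L-1))))
      B1
  -- for i in B: if i != 1: B[i] += B[i-1]; B[i].sort()
  let B3 : PySem.Dict Int (List Int) :=
    B2.keys.foldl
      (fun d i => if i ≠ 1 then d.insert i (PySem.List.sorted (d.getD i [] ++ d.getD (i-1) []) (fun x => x)) else d)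
      B2
  -- for i in B: C[i] = set(range(L**2)) - set(B[i]) - A
  let C : PySem.Dict Int (List Int) :=
    B3.keys.foldl
      (fun c i => c.insert i (PySem.Set.diff (PySem.Set.diff (PySem.Set.ofList (PySem.List.pyRange 0 (L^2))) (PySem.Set.ofList (B3.getD i []))) A))
      PySem.Dict.empty
  (A, B3.items, C.items)

-- ===== PORT B =====
def ABC_alt (L : Int) : List Int × (List (Int × List Int)) × (List (Int × List Int)) :=
  let A : PySem.Set Int := PySem.Set.ofList [0]
  -- for i in range(1, 2*L-2):
  --   bi = []; ci = set()
  --   for r in range(L):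
  --     bi.extend(range(r*L + max(0, 1-r), r*L + min(i-r, L-1) + 1))
  --     ci.update(range(r*L + max(0, i+1-r), r*L + L))
  --   B[i] = bi; C[i] = ci
  let BC : PySem.Dict Int (List Int) × PySem.Dict Int (List Int) :=
    (PySem.List.pyRange 1 (2*L-2)).foldl
      (fun bc i =>
        let rc : List Int × PySem.Set Int :=
          (PySem.List.pyRange 0 L).foldl
            (fun s r =>
              (s.1 ++ PySem.List.pyRange (r*L + max 0 (1-r)) (r*L + min (i-r) (L-1) + 1),
               PySem.Set.update s.2 (PySem.List.pyRange (r*L + max 0 (i+1-r)) (r*L + L))))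
            ([], PySem.Set.empty)
        (bc.1.insert i rc.1, bc.2.insert i rc.2))
      (PySem.Dict.empty, PySem.Dict.empty)
  (A, BC.1.items, BC.2.items)

-- ===== PRECONDITION & SPEC =====
def Spec_ABC (L : Int) (out : List Int × (List (Int × List Int)) × (List (Int × List Int))) : Prop := out = ABC_alt L
instance (L : Int) (out : List Int × (List (Int × List Int)) × (List (Int × List Int))) : Decidable (Spec_ABC L out) := by unfold Spec_ABC; infer_instance

-- ===== CLAIM (what is proved, stated in full; the proofs are below) =====
def Claim_equal_ABC : Prop := ∀ (L : Int), Dom_ABC L → Spec_ABC L (ABC L)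

-- ===== LEMMAS AND PROOFS =====

-- anti-diagonal of cell x in the L×L grid
def pvDg (L x : Int) : Int := PySem.Int.floordiv x L + PySem.Int.mod x L

-- B's value for key i (a list) and C's value for key i (before Set.ofList)
def pvB (L i : Int) : List Int :=
  (PySem.List.pyRange 0 (L*L)).filter (fun x => decide (1 ≤ pvDg L x ∧ pvDg L x ≤ i))
def pvC (L i : Int) : List Int :=
  (PySem.List.pyRange 0 (L*L)).filter (fun x => decide (i < pvDg L x))

-- A's freshly built chunk for key i (diagonal i), covering both regions
def pvCh (L i : Int) : List Int :=
  if i < L then (PySem.List.pyRange 0 (i+1)).map (fun j => i + j*(L-1))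
  else (PySem.List.pyRange 1 (2*L-i)).map (fun j => (i-L+1)*L + j*(L-1))

-- the dict whose items are (k, f k) for k over ks
def pvMapDict (ks : List Int) (f : Int → List Int) : PySem.Dict Int (List Int) :=
  ⟨ks.map (fun k => (k, f k))⟩

theorem pv_eq_of_pairwise_lt (l1 l2 : List Int) (h1 : l1.Pairwise (· < ·))
    (h2 : l2.Pairwise (· < ·)) (hm : ∀ x, x ∈ l1 ↔ x ∈ l2) : l1 = l2 := by
  refine List.Perm.eq_of_pairwise (le := (· < ·)) ?_ h1 h2 ?_
  · intro a b _ _ hab hba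
    exact absurd hba (lt_asymm hab)
  · exact (List.perm_ext_iff_of_nodup (h1.imp ne_of_lt) (h2.imp ne_of_lt)).mpr hm

theorem pvDg_decomp (L x : Int) (hL : 0 < L) (hx : 0 ≤ x) :
    PySem.Int.floordiv x L * L + PySem.Int.mod x L = x ∧
    0 ≤ PySem.Int.mod x L ∧ PySem.Int.mod x L < L ∧ 0 ≤ PySem.Int.floordiv x L := by
  refine ⟨PySem.Int.floordiv_mul_add_mod x L, PySem.Int.mod_nonneg x hL, PySem.Int.mod_lt x hL, ?_⟩
  rw [PySem.Int.floordiv_eq_ediv_of_pos hL]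
  exact Int.ediv_nonneg hx hL.le

theorem pvDg_cell (L r c : Int) (hL : 0 < L) (hr : 0 ≤ r) (hc : 0 ≤ c) (hcL : c < L) :
    pvDg L (r*L + c) = r + c := by
  have hfd : PySem.Int.floordiv (r*L + c) L = r := by
    rw [PySem.Int.floordiv_eq_iff_of_pos hL]
    constructor
    · linarith
    · nlinarith
  have hmod := PySem.Int.floordiv_mul_add_mod (r*L + c) L
  rw [hfd] at hmod
  have hm : PySem.Int.mod (r*L + c) L = c := by linarith
  unfold pvDg
  rw [hfd, hm]

theorem pv_dg_char (L x : Int) (hL : 0 < L) (hx : 0 ≤ x) (hx2 : x < L*L) :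
    ∃ r c, x = r*L + c ∧ 0 ≤ r ∧ r < L ∧ 0 ≤ c ∧ c < L ∧ pvDg L x = r + c := by
  obtain ⟨hsum, hm0, hmL, hf0⟩ := pvDg_decomp L x hL hx
  refine ⟨PySem.Int.floordiv x L, PySem.Int.mod x L, by linarith, hf0, ?_, hm0, hmL, rfl⟩
  by_contra h
  have h' : L ≤ PySem.Int.floordiv x L := not_lt.mp h
  have : L * L ≤ PySem.Int.floordiv x L * L := by nlinarith
  linarith

theorem pv_mem_ch (L i x : Int) (hL : 2 ≤ L) (hi1 : 1 ≤ i) (hi2 : i ≤ 2*L-3) :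
    x ∈ pvCh L i ↔ (0 ≤ x ∧ x < L*L ∧ pvDg L x = i) := by
  unfold pvCh
  by_cases hiL : i < L
  · rw [if_pos hiL]
    simp only [List.mem_map, PySem.List.mem_pyRange_one]
    constructor
    · rintro ⟨j, ⟨hj0, hj1⟩, rfl⟩
      have hx : i + j*(L-1) = j*L + (i-j) := by ring
      rw [hx]
      have hdg := pvDg_cell L j (i-j) (by omega) (by omega) (by omega) (by omega)
      have hjl : j*L ≤ (L-1)*L := mul_le_mul_of_nonneg_right (by omega) (by omega)
      have hjn : 0 ≤ j*L := mul_nonneg (by omega) (by omega)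
      refine ⟨by linarith, by nlinarith, by rw [hdg]; omega⟩
    · rintro ⟨hx0, hxL, hdg⟩
      obtain ⟨r, c, hsum, hr0, hrL, hc0, hcL, hdg'⟩ := pv_dg_char L x (by omega) hx0 hxL
      rw [hdg'] at hdg
      refine ⟨r, ⟨by omega, by omega⟩, ?_⟩
      have heq : i + r*(L-1) = r*L + (i - r) := by ring
      rw [heq, hsum]
      omega
  · rw [if_neg hiL]
    have hiL' : L ≤ i := not_lt.mp hiL
    simp only [List.mem_map, PySem.List.mem_pyRange_one]
    constructor
    · rintro ⟨j, ⟨hj0, hj1⟩, rfl⟩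
      have hx : (i-L+1)*L + j*(L-1) = (i-L+j)*L + (L-j) := by ring
      rw [hx]
      have hdg := pvDg_cell L (i-L+j) (L-j) (by omega) (by omega) (by omega) (by omega)
      have hjl : (i-L+j)*L ≤ (L-1)*L := mul_le_mul_of_nonneg_right (by omega) (by omega)
      have hjn : 0 ≤ (i-L+j)*L := mul_nonneg (by omega) (by omega)
      refine ⟨by linarith, by nlinarith, by rw [hdg]; omega⟩
    · rintro ⟨hx0, hxL, hdg⟩
      obtain ⟨r, c, hsum, hr0, hrL, hc0, hcL, hdg'⟩ := pv_dg_char L x (by omega) hx0 hxL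
      rw [hdg'] at hdg
      refine ⟨r - i + L, ⟨by omega, by omega⟩, ?_⟩
      have heq : (i-L+1)*L + (r - i + L)*(L-1) = r*L + (i - r) := by ring
      rw [heq, hsum]
      omega

theorem pv_pairwise_ch (L i : Int) (hL : 2 ≤ L) : (pvCh L i).Pairwise (· < ·) := by
  unfold pvCh
  split
  · rw [List.pairwise_map]
    refine (PySem.List.pairwise_lt_pyRange_one _ _).imp ?_
    intro a b hab
    have := mul_lt_mul_of_pos_right hab (show (0:Int) < L-1 by omega)
    linarith
  · rw [List.pairwise_map]
    refine (PySem.List.pairwise_lt_pyRange_one _ _).imp ?_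
    intro a b hab
    have := mul_lt_mul_of_pos_right hab (show (0:Int) < L-1 by omega)
    linarith

theorem pv_mem_pvB (L i x : Int) :
    x ∈ pvB L i ↔ (0 ≤ x ∧ x < L*L ∧ 1 ≤ pvDg L x ∧ pvDg L x ≤ i) := by
  simp only [pvB, List.mem_filter, PySem.List.mem_pyRange_one, decide_eq_true_eq]
  tauto

theorem pv_pairwise_pvB (L i : Int) : (pvB L i).Pairwise (· < ·) := by
  unfold pvB
  exact List.Pairwise.sublist List.filter_sublist (PySem.List.pairwise_lt_pyRange_one 0 (L*L))

theorem pv_ch_one (L : Int) (hL : 2 ≤ L) : pvCh L 1 = pvB L 1 := by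
  refine pv_eq_of_pairwise_lt _ _ (pv_pairwise_ch L 1 hL) (pv_pairwise_pvB L 1) ?_
  intro x
  rw [pv_mem_ch L 1 x hL (by omega) (by omega), pv_mem_pvB]
  set d := pvDg L x with hd
  set n := L*L with hn
  omega

theorem pv_sorted_step (L i : Int) (hL : 2 ≤ L) (hi1 : 2 ≤ i) (hi2 : i ≤ 2*L-3) :
    PySem.List.sorted (pvCh L i ++ pvB L (i-1)) (fun x => x) = pvB L i := by
  refine PySem.List.sorted_eq_of_perm_of_pairwise_lt _ _ _ ?_ (pv_pairwise_pvB L i)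
  have ndc := (pv_pairwise_ch L i hL).imp (ne_of_lt (α := Int))
  have ndb := (pv_pairwise_pvB L (i-1)).imp (ne_of_lt (α := Int))
  have ndB := (pv_pairwise_pvB L i).imp (ne_of_lt (α := Int))
  have hdisj : ∀ a ∈ pvCh L i, ∀ b ∈ pvB L (i-1), a ≠ b := by
    intro a ha b hb heq
    subst heq
    rw [pv_mem_ch L i a hL (by omega) hi2] at ha
    rw [pv_mem_pvB] at hb
    set d := pvDg L a with hd
    set n := L*L with hn
    omega
  refine (List.perm_ext_iff_of_nodup ndB (List.nodup_append.mpr ⟨ndc, ndb, hdisj⟩)).mpr ?_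
  intro x
  rw [pv_mem_pvB, List.mem_append, pv_mem_ch L i x hL (by omega) hi2, pv_mem_pvB]
  set d := pvDg L x with hd
  set n := L*L with hn
  omega

theorem pv_find_map (t : List Int) (f : Int → List Int) (k : Int) :
    List.find? (fun p => p.1 == k) (t.map (fun j => (j, f j))) =
      if k ∈ t then some (k, f k) else none := by
  induction t with
  | nil => simp
  | cons a t ih =>
    by_cases h : a = k
    · subst h
      rw [List.map_cons, List.find?_cons_of_pos (by simp)]
      simp
    · rw [List.map_cons, List.find?_cons_of_neg (by simpa using h), ih]
      have h2 : ¬ k = a := fun hh => h hh.symm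
      simp [List.mem_cons, h2]

theorem pv_getD_mapDict (ks : List Int) (f : Int → List Int) (k : Int) (d : List Int) :
    (pvMapDict ks f).getD k d = if k ∈ ks then f k else d := by
  unfold pvMapDict PySem.Dict.getD PySem.Dict.get?
  show (Option.map _ (List.find? _ (ks.map fun j => (j, f j)))).getD d = _
  rw [pv_find_map]
  by_cases h : k ∈ ks <;> simp [h]

theorem pv_contains_mapDict (ks : List Int) (f : Int → List Int) (k : Int) :
    (pvMapDict ks f).contains k = decide (k ∈ ks) := by
  unfold pvMapDict PySem.Dict.contains
  show ((ks.map fun j => (j, f j)).any fun p => p.1 == k) = _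
  rw [List.any_map]
  simp only [Function.comp_def]
  induction ks with
  | nil => rfl
  | cons a t ih =>
    by_cases h : a = k
    · subst h; simp
    · have h2 : ¬ k = a := fun hh => h hh.symm
      simp [List.any_cons, ih, List.mem_cons, h, h2]

theorem pv_keys_mapDict (ks : List Int) (f : Int → List Int) :
    (pvMapDict ks f).keys = ks := by
  unfold pvMapDict PySem.Dict.keys
  show (ks.map fun j => (j, f j)).map (fun x => x.1) = ks
  rw [List.map_map]
  simp [Function.comp_def]

theorem pv_insert_mapDict_mem (ks : List Int) (f : Int → List Int) (k : Int) (v : List Int)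
    (hk : k ∈ ks) :
    (pvMapDict ks f).insert k v = pvMapDict ks (fun j => if j = k then v else f j) := by
  unfold PySem.Dict.insert
  rw [pv_contains_mapDict]
  rw [if_pos (by simpa using hk)]
  show (⟨((pvMapDict ks f).items).map _⟩ : PySem.Dict Int (List Int)) = _
  unfold pvMapDict
  congr 1
  rw [List.map_map]
  refine List.map_congr_left ?_
  intro j _
  by_cases hj : j = k
  · subst hj; simp
  · simp [hj]

theorem pv_foldl_insert_fresh (ks : List Int) (f : Int → List Int) (d : PySem.Dict Int (List Int))
    (hf : ∀ k ∈ ks, d.contains k = false) (hnd : ks.Nodup) :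
    (ks.foldl (fun d i => d.insert i (f i)) d).items = d.items ++ ks.map (fun k => (k, f k)) := by
  induction ks generalizing d with
  | nil => simp
  | cons k t ih =>
    have hins : (d.insert k (f k)).items = d.items ++ [(k, f k)] := by
      unfold PySem.Dict.insert
      rw [hf k (List.mem_cons_self)]
      simp
    have hfresh : ∀ k' ∈ t, (d.insert k (f k)).contains k' = false := by
      intro k' hk'
      have hne : k' ≠ k := by
        rintro rfl
        exact (List.nodup_cons.mp hnd).1 hk'
      have h1 : d.items.any (fun p => p.1 == k') = false := hf k' (List.mem_cons_of_mem _ hk')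
      show (d.insert k (f k)).items.any (fun p => p.1 == k') = false
      rw [hins, List.any_append, h1]
      simp [Ne.symm hne]
    rw [List.foldl_cons, ih (d.insert k (f k)) hfresh hnd.of_cons, hins, List.map_cons,
      List.append_assoc]
    rfl

theorem pv_loop12 (L : Int) (hL : 2 ≤ L) :
    ((PySem.List.pyRange L (2*L-2)).foldl
      (fun d i => d.insert i ((PySem.List.pyRange 1 (2*L-i)).map (fun j => (i-L+1)*L + j*(L-1))))
      ((PySem.List.pyRange 1 L).foldl
        (fun d i => d.insert i ((PySem.List.pyRange 0 (i+1)).map (fun j => i + j*(L-1))))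
        PySem.Dict.empty)) = pvMapDict (PySem.List.pyRange 1 (2*L-2)) (pvCh L) := by
  have h1 : ((PySem.List.pyRange 1 L).foldl
      (fun d i => d.insert i ((PySem.List.pyRange 0 (i+1)).map (fun j => i + j*(L-1))))
      PySem.Dict.empty) = pvMapDict (PySem.List.pyRange 1 L)
        (fun i => (PySem.List.pyRange 0 (i+1)).map (fun j => i + j*(L-1))) := by
    apply PySem.Dict.ext
    rw [pv_foldl_insert_fresh _ _ _ (fun k _ => rfl) (PySem.List.nodup_pyRange_one 1 L)]
    rfl
  rw [h1]
  apply PySem.Dict.ext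
  rw [pv_foldl_insert_fresh _ _ _ ?_ (PySem.List.nodup_pyRange_one L (2*L-2))]
  · show (pvMapDict (PySem.List.pyRange 1 L) _).items ++ _ = (pvMapDict _ _).items
    unfold pvMapDict
    simp only
    rw [PySem.List.pyRange_one_append 1 L (2*L-2) (by omega) (by omega), List.map_append]
    congr 1
    · refine List.map_congr_left ?_
      intro i hi
      rw [PySem.List.mem_pyRange_one] at hi
      beta_reduce
      rw [pvCh, if_pos (by omega)]
    · refine List.map_congr_left ?_
      intro i hi
      rw [PySem.List.mem_pyRange_one] at hi
      beta_reduce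
      rw [pvCh, if_neg (by omega)]
  · intro k hk
    rw [PySem.List.mem_pyRange_one] at hk
    rw [pv_contains_mapDict]
    simp [PySem.List.mem_pyRange_one]
    omega

theorem pv_loop3 (L b : Int) (hL : 2 ≤ L) (hb1 : 1 ≤ b) (hb2 : b ≤ 2*L-2) :
    (PySem.List.pyRange 1 b).foldl
      (fun d i => if i ≠ 1 then d.insert i (PySem.List.sorted (d.getD i [] ++ d.getD (i-1) []) (fun x => x)) else d)
      (pvMapDict (PySem.List.pyRange 1 (2*L-2)) (pvCh L))
    = pvMapDict (PySem.List.pyRange 1 (2*L-2)) (fun k => if k < b then pvB L k else pvCh L k) := by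
  suffices H : ∀ m : Nat, (1:Int) + m ≤ 2*L-2 →
      (PySem.List.pyRange 1 (1 + (m:Int))).foldl
        (fun d i => if i ≠ 1 then d.insert i (PySem.List.sorted (d.getD i [] ++ d.getD (i-1) []) (fun x => x)) else d)
        (pvMapDict (PySem.List.pyRange 1 (2*L-2)) (pvCh L))
      = pvMapDict (PySem.List.pyRange 1 (2*L-2)) (fun k => if k < 1 + (m:Int) then pvB L k else pvCh L k) by
    have hb : b = 1 + ((b-1).toNat : Int) := by omega
    rw [hb]
    exact H _ (by omega)
  intro m
  induction m with
  | zero =>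
    intro _
    simp only [Nat.cast_zero, add_zero]
    rw [PySem.List.pyRange_one_eq_nil (a := 1) (b := 1) (le_refl 1)]
    simp only [List.foldl_nil]
    unfold pvMapDict
    congr 1
    refine List.map_congr_left ?_
    intro k hk
    rw [PySem.List.mem_pyRange_one] at hk
    beta_reduce
    rw [if_neg (by omega)]
  | succ m ih =>
    intro hm
    push_cast at hm ⊢
    have hsucc : (1:Int) + ((m:Int) + 1) = (1 + (m:Int)) + 1 := by ring
    rw [hsucc, PySem.List.pyRange_one_succ_right (by omega), List.foldl_append,
      ih (by omega), List.foldl_cons, List.foldl_nil]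
    by_cases hm0 : (m:Int) = 0
    · rw [if_neg (by omega)]
      unfold pvMapDict
      congr 1
      refine List.map_congr_left ?_
      intro k hk
      rw [PySem.List.mem_pyRange_one] at hk
      beta_reduce
      by_cases hk1 : k = 1
      · subst hk1
        rw [if_neg (by omega), if_pos (by omega), ← pv_ch_one L hL]
      · rw [if_neg (by omega), if_neg (by omega)]
    · set i : Int := 1 + (m:Int) with hidef
      have hi2 : 2 ≤ i := by omega
      have hik : i ∈ PySem.List.pyRange 1 (2*L-2) := by
        rw [PySem.List.mem_pyRange_one]; omega
      have hik' : i - 1 ∈ PySem.List.pyRange 1 (2*L-2) := by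
        rw [PySem.List.mem_pyRange_one]; omega
      rw [if_pos (by omega)]
      rw [pv_getD_mapDict, pv_getD_mapDict, if_pos hik, if_pos hik']
      rw [if_neg (by omega), if_pos (by omega)]
      rw [pv_sorted_step L i hL hi2 (by omega)]
      rw [pv_insert_mapDict_mem _ _ _ _ hik]
      unfold pvMapDict
      congr 1
      refine List.map_congr_left ?_
      intro k hk
      rw [PySem.List.mem_pyRange_one] at hk
      beta_reduce
      by_cases hki : k = i
      · subst hki
        rw [if_pos rfl, if_pos (by omega)]
      · rw [if_neg hki]
        by_cases hkb : k < i
        · rw [if_pos hkb, if_pos (by omega)]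
        · rw [if_neg hkb, if_neg (by omega)]

theorem pv_ofList_aux (l s : List Int) (h : (s ++ l).Nodup) :
    l.foldl PySem.Set.add s = s ++ l := by
  induction l generalizing s with
  | nil => simp
  | cons x t ih =>
    have hx : x ∉ s := by
      intro hxs
      exact (List.disjoint_of_nodup_append h) hxs (List.mem_cons_self)
    have hadd : PySem.Set.add s x = s ++ [x] := by
      unfold PySem.Set.add
      rw [if_neg (by simpa [PySem.Set.contains] using hx)]
    rw [List.foldl_cons, hadd, ih (s ++ [x]) (by simpa using h)]
    simp

theorem pv_ofList_eq_self (l : List Int) (h : l.Nodup) : PySem.Set.ofList l = l := by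
  unfold PySem.Set.ofList PySem.Set.empty
  simpa using pv_ofList_aux l [] (by simpa using h)

theorem pv_dg_zero (L x : Int) (hL : 0 < L) (hx : 0 ≤ x) (hx2 : x < L*L) :
    (pvDg L x = 0 ↔ x = 0) ∧ 0 ≤ pvDg L x := by
  obtain ⟨r, c, hsum, hr0, hrL, hc0, hcL, hdg⟩ := pv_dg_char L x hL hx hx2
  rw [hdg]
  constructor
  · constructor
    · intro h
      have hr : r = 0 := by linarith
      have hc : c = 0 := by linarith
      rw [hsum, hr, hc]; ring
    · intro h
      rw [h] at hsum
      have hrc : 0 ≤ r*L := mul_nonneg hr0 (le_of_lt hL)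
      have hc' : c = 0 := by linarith
      have hr' : r*L = 0 := by linarith
      have hr0' : r = 0 := by
        rcases mul_eq_zero.mp hr' with h1 | h1
        · exact h1
        · exact absurd h1 (by linarith)
      rw [hr0', hc']
      ring
  · linarith


-- B's per-key row decompositions (proof-side names for the inner loop's results)
def pvRowB (L i : Int) : List Int :=
  (PySem.List.pyRange 0 L).flatMap
    (fun r => PySem.List.pyRange (r*L + max 0 (1-r)) (r*L + min (i-r) (L-1) + 1))
def pvRowC (L i : Int) : List Int :=
  (PySem.List.pyRange 0 L).flatMap
    (fun r => PySem.List.pyRange (r*L + max 0 (i+1-r)) (r*L + L))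

theorem pv_mem_pvC (L i x : Int) :
    x ∈ pvC L i ↔ (0 ≤ x ∧ x < L*L ∧ i < pvDg L x) := by
  simp only [pvC, List.mem_filter, PySem.List.mem_pyRange_one, decide_eq_true_eq]
  tauto

theorem pv_pairwise_pvC (L i : Int) : (pvC L i).Pairwise (· < ·) := by
  unfold pvC
  exact List.Pairwise.sublist List.filter_sublist (PySem.List.pairwise_lt_pyRange_one 0 (L*L))

theorem pv_pairwise_flat (L : Int) (lo hi : Int → Int)
    (hb : ∀ r, 0 ≤ r → r < L → r*L ≤ lo r ∧ hi r ≤ r*L + L) :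
    ((PySem.List.pyRange 0 L).flatMap (fun r => PySem.List.pyRange (lo r) (hi r))).Pairwise (· < ·) := by
  rw [List.flatMap_def, List.pairwise_flatten]
  constructor
  · intro l' hl'
    obtain ⟨r, _, rfl⟩ := List.mem_map.mp hl'
    exact PySem.List.pairwise_lt_pyRange_one _ _
  · rw [List.pairwise_map]
    refine List.Pairwise.imp_of_mem ?_ (PySem.List.pairwise_lt_pyRange_one 0 L)
    intro r r' hr hr' hlt x hx y hy
    rw [PySem.List.mem_pyRange_one] at hr hr' hx hy
    obtain ⟨h1, h2⟩ := hb r hr.1 hr.2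
    obtain ⟨h3, h4⟩ := hb r' hr'.1 hr'.2
    have h5 : (r+1)*L ≤ r'*L := mul_le_mul_of_nonneg_right (by omega) (by linarith)
    have h6 : (r+1)*L = r*L + L := by ring
    linarith

theorem pv_mem_rowB (L i x : Int) (hL : 2 ≤ L) :
    x ∈ pvRowB L i ↔ (0 ≤ x ∧ x < L*L ∧ 1 ≤ pvDg L x ∧ pvDg L x ≤ i) := by
  unfold pvRowB
  simp only [List.mem_flatMap, PySem.List.mem_pyRange_one]
  constructor
  · rintro ⟨r, ⟨hr0, hrL⟩, hlo, hhi⟩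
    have hmax0 : (0:Int) ≤ max 0 (1-r) := le_max_left 0 (1-r)
    have hmax1 : (1-r:Int) ≤ max 0 (1-r) := le_max_right 0 (1-r)
    have hmin1 : min (i-r) (L-1) ≤ i-r := min_le_left _ _
    have hmin2 : min (i-r) (L-1) ≤ L-1 := min_le_right _ _
    have hrl0 : 0 ≤ r*L := mul_nonneg hr0 (by linarith)
    have hxdecomp : x = r*L + (x - r*L) := by ring
    have hdg := pvDg_cell L r (x - r*L) (by linarith) hr0 (by linarith) (by linarith)
    rw [← hxdecomp] at hdg
    have h5 : (r+1)*L ≤ L*L := mul_le_mul_of_nonneg_right (by linarith) (by linarith)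
    have h6 : (r+1)*L = r*L + L := by ring
    exact ⟨by linarith, by linarith, by linarith, by linarith⟩
  · rintro ⟨hx0, hxL, hdg1, hdg2⟩
    obtain ⟨r, c, hsum, hr0, hrL, hc0, hcL, hdg⟩ := pv_dg_char L x (by linarith) hx0 hxL
    refine ⟨r, ⟨hr0, hrL⟩, ?_, ?_⟩
    · have : max 0 (1-r) ≤ c := max_le hc0 (by linarith)
      linarith
    · have : c ≤ min (i-r) (L-1) := le_min (by linarith) (by linarith)
      linarith

theorem pv_mem_rowC (L i x : Int) (hL : 2 ≤ L) :
    x ∈ pvRowC L i ↔ (0 ≤ x ∧ x < L*L ∧ i < pvDg L x) := by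
  unfold pvRowC
  simp only [List.mem_flatMap, PySem.List.mem_pyRange_one]
  constructor
  · rintro ⟨r, ⟨hr0, hrL⟩, hlo, hhi⟩
    have hmax0 : (0:Int) ≤ max 0 (i+1-r) := le_max_left 0 (i+1-r)
    have hmax1 : (i+1-r:Int) ≤ max 0 (i+1-r) := le_max_right 0 (i+1-r)
    have hrl0 : 0 ≤ r*L := mul_nonneg hr0 (by linarith)
    have hxdecomp : x = r*L + (x - r*L) := by ring
    have hdg := pvDg_cell L r (x - r*L) (by linarith) hr0 (by linarith) (by linarith)
    rw [← hxdecomp] at hdg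
    have h5 : (r+1)*L ≤ L*L := mul_le_mul_of_nonneg_right (by linarith) (by linarith)
    have h6 : (r+1)*L = r*L + L := by ring
    exact ⟨by linarith, by linarith, by linarith⟩
  · rintro ⟨hx0, hxL, hdg1⟩
    obtain ⟨r, c, hsum, hr0, hrL, hc0, hcL, hdg⟩ := pv_dg_char L x (by linarith) hx0 hxL
    refine ⟨r, ⟨hr0, hrL⟩, ?_, ?_⟩
    · have : max 0 (i+1-r) ≤ c := max_le hc0 (by linarith)
      linarith
    · linarith

theorem pv_rowB_eq (L i : Int) (hL : 2 ≤ L) : pvRowB L i = pvB L i := by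
  refine pv_eq_of_pairwise_lt _ _ ?_ (pv_pairwise_pvB L i) ?_
  · exact pv_pairwise_flat L _ _ (fun r hr0 hrL =>
      ⟨by have := le_max_left (0:Int) (1-r); linarith,
       by have := min_le_right (i-r) (L-1); linarith⟩)
  · intro x
    rw [pv_mem_rowB L i x hL, pv_mem_pvB]

theorem pv_rowC_eq (L i : Int) (hL : 2 ≤ L) : pvRowC L i = pvC L i := by
  refine pv_eq_of_pairwise_lt _ _ ?_ (pv_pairwise_pvC L i) ?_
  · exact pv_pairwise_flat L _ _ (fun r hr0 hrL =>
      ⟨by have := le_max_left (0:Int) (i+1-r); linarith, by linarith⟩)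
  · intro x
    rw [pv_mem_rowC L i x hL, pv_mem_pvC]

theorem pv_foldl_update (ks : List Int) (g : Int → List Int) (s : PySem.Set Int) :
    ks.foldl (fun s r => PySem.Set.update s (g r)) s = (ks.flatMap g).foldl PySem.Set.add s := by
  induction ks generalizing s with
  | nil => simp
  | cons k t ih =>
    rw [List.foldl_cons, ih, List.flatMap_cons, List.foldl_append]
    rfl

theorem pv_inner (L i : Int) (hL : 2 ≤ L) :
    ((PySem.List.pyRange 0 L).foldl
      (fun s r =>
        (s.1 ++ PySem.List.pyRange (r*L + max 0 (1-r)) (r*L + min (i-r) (L-1) + 1),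
         PySem.Set.update s.2 (PySem.List.pyRange (r*L + max 0 (i+1-r)) (r*L + L))))
      (([] : List Int), PySem.Set.empty))
    = (pvB L i, PySem.Set.ofList (pvC L i)) := by
  rw [PySem.List.foldl_prod_mk
    (f := fun (acc : List Int) r => acc ++ PySem.List.pyRange (r*L + max 0 (1-r)) (r*L + min (i-r) (L-1) + 1))
    (g := fun (acc : PySem.Set Int) r => PySem.Set.update acc (PySem.List.pyRange (r*L + max 0 (i+1-r)) (r*L + L)))]
  refine Prod.ext ?_ ?_
  · show (PySem.List.pyRange 0 L).foldl _ [] = pvB L i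
    rw [PySem.List.foldl_append_eq_flatMap, List.nil_append]
    exact pv_rowB_eq L i hL
  · show (PySem.List.pyRange 0 L).foldl _ PySem.Set.empty = PySem.Set.ofList (pvC L i)
    rw [pv_foldl_update, ← pv_rowC_eq L i hL]
    rfl

theorem pv_cval (L i : Int) (hL : 2 ≤ L) (hi1 : 1 ≤ i) :
    PySem.Set.diff (PySem.Set.diff (PySem.Set.ofList (PySem.List.pyRange 0 (L^2))) (PySem.Set.ofList (pvB L i))) (PySem.Set.ofList [0])
    = PySem.Set.ofList (pvC L i) := by
  have hpow : (L^2 : Int) = L*L := by ring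
  rw [hpow, pv_ofList_eq_self _ (PySem.List.nodup_pyRange_one 0 (L*L)),
    pv_ofList_eq_self (pvC L i) (List.Nodup.filter _ (PySem.List.nodup_pyRange_one 0 (L*L)))]
  unfold PySem.Set.diff pvC
  rw [List.filter_filter]
  refine List.filter_congr ?_
  intro x hx
  rw [PySem.List.mem_pyRange_one] at hx
  obtain ⟨hz1, hz2⟩ := pv_dg_zero L x (by omega) hx.1 hx.2
  rw [← Bool.coe_iff_coe]
  simp [PySem.Set.contains, PySem.Set.mem_ofList, pv_mem_pvB]
  set d := pvDg L x with hd
  set n := L*L with hn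
  clear hpow
  clear_value d n
  clear hd hn
  omega

theorem pv_main (L : Int) : ABC L = ABC_alt L := by
  by_cases hL : L ≤ 1
  · have e1 : PySem.List.pyRange 1 L = [] := PySem.List.pyRange_one_eq_nil (by omega)
    have e2 : PySem.List.pyRange L (2*L-2) = [] := PySem.List.pyRange_one_eq_nil (by omega)
    have e3 : PySem.List.pyRange 1 (2*L-2) = [] := PySem.List.pyRange_one_eq_nil (by omega)
    simp only [ABC, ABC_alt, e1, e2, e3, List.foldl_nil]
    rfl
  · have hL2 : 2 ≤ L := by omega
    have hnd := PySem.List.nodup_pyRange_one 1 (2*L-2)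
    simp only [ABC, ABC_alt]
    rw [pv_loop12 L hL2, pv_keys_mapDict, pv_loop3 L (2*L-2) hL2 (by omega) (le_refl _)]
    have hfin : pvMapDict (PySem.List.pyRange 1 (2*L-2)) (fun k => if k < 2*L-2 then pvB L k else pvCh L k)
        = pvMapDict (PySem.List.pyRange 1 (2*L-2)) (pvB L) := by
      unfold pvMapDict
      congr 1
      refine List.map_congr_left ?_
      intro k hk
      rw [PySem.List.mem_pyRange_one] at hk
      beta_reduce
      rw [if_pos (by omega)]
    rw [hfin, pv_keys_mapDict]
    rw [PySem.List.foldl_prod_mk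
      (f := fun (d : PySem.Dict Int (List Int)) i => d.insert i
        (((PySem.List.pyRange 0 L).foldl
          (fun s r =>
            (s.1 ++ PySem.List.pyRange (r*L + max 0 (1-r)) (r*L + min (i-r) (L-1) + 1),
             PySem.Set.update s.2 (PySem.List.pyRange (r*L + max 0 (i+1-r)) (r*L + L))))
          (([] : List Int), PySem.Set.empty)).1))
      (g := fun (d : PySem.Dict Int (List Int)) i => d.insert i
        (((PySem.List.pyRange 0 L).foldl
          (fun s r =>
            (s.1 ++ PySem.List.pyRange (r*L + max 0 (1-r)) (r*L + min (i-r) (L-1) + 1),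
             PySem.Set.update s.2 (PySem.List.pyRange (r*L + max 0 (i+1-r)) (r*L + L))))
          (([] : List Int), PySem.Set.empty)).2))]
    refine Prod.ext rfl (Prod.ext ?_ ?_)
    · show (pvMapDict (PySem.List.pyRange 1 (2*L-2)) (pvB L)).items
        = ((PySem.List.pyRange 1 (2*L-2)).foldl _ PySem.Dict.empty).items
      rw [pv_foldl_insert_fresh _ _ _ (fun k _ => rfl) hnd]
      show List.map (fun k => ((k : Int), pvB L k)) (PySem.List.pyRange 1 (2*L-2)) = [] ++ _
      rw [List.nil_append]
      refine List.map_congr_left ?_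
      intro i hi
      rw [PySem.List.mem_pyRange_one] at hi
      beta_reduce
      rw [pv_inner L i hL2]
    · show _ = ((PySem.List.pyRange 1 (2*L-2)).foldl _ PySem.Dict.empty).items
      rw [pv_foldl_insert_fresh _ _ _ (fun k _ => rfl) hnd,
        pv_foldl_insert_fresh _ _ _ (fun k _ => rfl) hnd]
      show [] ++ _ = [] ++ _
      congr 1
      refine List.map_congr_left ?_
      intro i hi
      rw [PySem.List.mem_pyRange_one] at hi
      beta_reduce
      rw [pv_inner L i hL2]
      rw [pv_getD_mapDict, if_pos (by rw [PySem.List.mem_pyRange_one]; omega)]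
      rw [pv_cval L i hL2 (by omega)]

-- ===== VERDICT (by name: the statement is the Claim_ definition above) =====
theorem ABC_spec : Claim_equal_ABC := by
  intro L _
  unfold Spec_ABC
  exact pv_main L
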